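-- pv_equiv track=rewrite | github.com/nickovic/rtamt | rtamt/explanation/ltl/discrete_time/explanations.py | explain_sat_eventually
-- ===== SOURCE A (Python) =====
-- def explain_sat_eventually(op_signal, intervals):
--     op_intervals = []
--     if intervals:
--         begin, end = intervals[0]
--         state = False
--         for i in range(begin, len(op_signal)):
--             if not state and op_signal[i] >= 0:
--                 state = True
--                 start = i
--             elif state and op_signal[i] < 0:
--                 state = False
--                 op_intervals.append([start, i-1])
--         if state:
--             op_intervals.append([start, len(op_signal)-1])
--
--     return op_intervals
-- ===== SOURCE B (Python) =====
-- def explain_sat_eventually(op_signal, intervals):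
--     if not intervals:
--         return []
--     begin, end = intervals[0]
--     n = len(op_signal)
--     starts = [i for i in range(begin, n)
--               if op_signal[i] >= 0 and (i == begin or op_signal[i - 1] < 0)]
--     ends = [i for i in range(begin, n)
--             if op_signal[i] >= 0 and (i == n - 1 or op_signal[i + 1] < 0)]
--     return [[s, e] for s, e in zip(starts, ends)]
-- ===== Notes on version B (the rewrite author's own statement) =====
-- stated objective: alternative
-- what changed: Replaced the sequential boolean state machine by stateless boundary detection: two comprehensions collect run starts (non-negative with negative left neighbour or at begin) and run ends (non-negative with negative right neighbour or at the last index), which are then zipped into intervals.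
import Mathlib
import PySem

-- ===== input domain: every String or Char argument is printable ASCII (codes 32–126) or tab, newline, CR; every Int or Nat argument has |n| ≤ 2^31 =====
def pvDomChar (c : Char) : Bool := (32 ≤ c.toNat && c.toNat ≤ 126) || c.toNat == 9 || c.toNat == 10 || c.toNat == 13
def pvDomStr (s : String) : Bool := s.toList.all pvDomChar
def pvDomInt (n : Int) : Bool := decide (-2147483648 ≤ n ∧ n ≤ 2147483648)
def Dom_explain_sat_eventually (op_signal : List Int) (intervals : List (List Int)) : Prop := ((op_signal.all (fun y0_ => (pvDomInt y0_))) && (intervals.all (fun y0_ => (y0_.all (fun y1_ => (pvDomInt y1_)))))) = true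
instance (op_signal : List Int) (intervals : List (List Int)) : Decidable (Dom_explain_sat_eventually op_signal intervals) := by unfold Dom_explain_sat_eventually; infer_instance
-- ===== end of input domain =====

-- B replaces A's sequential state machine by stateless boundary detection: it filters the
-- index range for run starts (negative left neighbour or at begin) and run ends (negative
-- right neighbour or at the last index) and zips the two lists (alternative; same cost).

-- ===== PORT A =====
-- one iteration of A's for-loop: state = (state flag, start, op_intervals)
def pvStepA (op_signal : List Int) (st : Bool × Int × List (List Int)) (i : Int) :
    Bool × Int × List (List Int) :=
  if !st.1 && decide (0 ≤ (PySem.List.pyGet? op_signal i).getD 0) then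
    (true, i, st.2.2)
  else if st.1 && decide ((PySem.List.pyGet? op_signal i).getD 0 < 0) then
    (false, st.2.1, st.2.2 ++ [[st.2.1, i - 1]])
  else st

-- A's trailing 'if state: op_intervals.append([start, len(op_signal)-1])'
def pvFinishA (e : Int) (fin : Bool × Int × List (List Int)) : List (List Int) :=
  if fin.1 then fin.2.2 ++ [[fin.2.1, e - 1]] else fin.2.2

def explain_sat_eventually (op_signal : List Int) (intervals : List (List Int)) : List (List Int) :=
  match intervals with
  | [] => []
  | iv :: _ =>
    let begin_ : Int := (PySem.List.pyGet? iv 0).getD 0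
    pvFinishA (op_signal.length : Int)
      ((PySem.List.pyRange begin_ (op_signal.length : Int) 1).foldl
        (pvStepA op_signal) (false, 0, []))

-- ===== PORT B =====
def explain_sat_eventually_alt (op_signal : List Int) (intervals : List (List Int)) : List (List Int) :=
  match intervals with
  | [] => []
  | iv :: _ =>
    let begin_ : Int := (PySem.List.pyGet? iv 0).getD 0
    let n : Int := (op_signal.length : Int)
    let g : Int → Int := fun i => (PySem.List.pyGet? op_signal i).getD 0
    let idxs := PySem.List.pyRange begin_ n 1
    let starts := idxs.filter (fun i => decide (0 ≤ g i) && (decide (i = begin_) || decide (g (i - 1) < 0)))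
    let ends := idxs.filter (fun i => decide (0 ≤ g i) && (decide (i = n - 1) || decide (g (i + 1) < 0)))
    (starts.zip ends).map (fun p => [p.1, p.2])

-- ===== PRECONDITION & SPEC =====
-- Pre_ excludes exactly the inputs on which the Python A raises: a nonempty intervals whose
-- first element does not have exactly two entries (tuple unpacking raises ValueError), or
-- whose first entry (begin) is below -len(op_signal) (op_signal[i] raises IndexError).
def Pre_explain_sat_eventually (op_signal : List Int) (intervals : List (List Int)) : Prop :=
  intervals = [] ∨
    ((intervals.headD []).length = 2 ∧
      -(op_signal.length : Int) ≤ (intervals.headD []).headD 0)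
instance (op_signal : List Int) (intervals : List (List Int)) : Decidable (Pre_explain_sat_eventually op_signal intervals) := by unfold Pre_explain_sat_eventually; infer_instance

def pvWitness_explain_sat_eventually : List Int × List (List Int) := ([1, -2, 3, 4, -5], [[0, 4]])

def Spec_explain_sat_eventually (op_signal : List Int) (intervals : List (List Int)) (out : List (List Int)) : Prop := out = explain_sat_eventually_alt op_signal intervals
instance (op_signal : List Int) (intervals : List (List Int)) (out : List (List Int)) : Decidable (Spec_explain_sat_eventually op_signal intervals out) := by unfold Spec_explain_sat_eventually; infer_instance

-- ===== CLAIM (what is proved, stated in full; the proofs are below) =====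
def Claim_equal_explain_sat_eventually : Prop := ∀ (op_signal : List Int) (intervals : List (List Int)), Dom_explain_sat_eventually op_signal intervals → Pre_explain_sat_eventually op_signal intervals → Spec_explain_sat_eventually op_signal intervals (explain_sat_eventually op_signal intervals)

-- ===== LEMMAS AND PROOFS =====

-- common recursive characterisation: scan [s, e) carrying an optional open start
def pvSpecRun (key : Int → Bool) (e : Int) (cur : Option Int) (s : Int) : List (List Int) :=
  if _h : e ≤ s then
    match cur with | some st => [[st, e - 1]] | none => []
  else if key s then pvSpecRun key e (some (cur.getD s)) (s + 1)
  else
    match cur with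
    | some st => [st, s - 1] :: pvSpecRun key e none (s + 1)
    | none => pvSpecRun key e none (s + 1)
termination_by (e - s).toNat
decreasing_by all_goals omega

lemma pvSpecRun_stop (key : Int → Bool) (e : Int) (cur : Option Int) (s : Int) (h : e ≤ s) :
    pvSpecRun key e cur s = match cur with | some st => [[st, e - 1]] | none => [] := by
  rw [pvSpecRun.eq_def]; simp [h]

lemma pvSpecRun_true (key : Int → Bool) (e : Int) (cur : Option Int) (s : Int)
    (h : ¬ e ≤ s) (hk : key s = true) :
    pvSpecRun key e cur s = pvSpecRun key e (some (cur.getD s)) (s + 1) := by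
  rw [pvSpecRun.eq_def]; simp [h, hk]

lemma pvSpecRun_false_some (key : Int → Bool) (e : Int) (st s : Int)
    (h : ¬ e ≤ s) (hk : key s = false) :
    pvSpecRun key e (some st) s = [st, s - 1] :: pvSpecRun key e none (s + 1) := by
  rw [pvSpecRun.eq_def]; simp [h, hk]

lemma pvSpecRun_false_none (key : Int → Bool) (e : Int) (s : Int)
    (h : ¬ e ≤ s) (hk : key s = false) :
    pvSpecRun key e none s = pvSpecRun key e none (s + 1) := by
  rw [pvSpecRun.eq_def]; simp [h, hk]

-- A's fold followed by the final flush computes pvSpecRun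
lemma pvA_run (op_signal : List Int) (e : Int) :
    ∀ (n : Nat) (s : Int), (e - s).toNat = n →
    ∀ (b : Bool) (start : Int) (acc : List (List Int)),
    pvFinishA e ((PySem.List.pyRange s e 1).foldl (pvStepA op_signal) (b, start, acc))
      = acc ++ pvSpecRun (fun i => decide (0 ≤ (PySem.List.pyGet? op_signal i).getD 0)) e
          (if b then some start else none) s := by
  intro n
  induction n with
  | zero =>
    intro s hn b start acc
    have hle : e ≤ s := by omega
    rw [PySem.List.pyRange_one_eq_nil hle, pvSpecRun_stop _ _ _ _ hle]
    cases b <;> simp [pvFinishA]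
  | succ n ih =>
    intro s hn b start acc
    have hlt : s < e := by omega
    have hne : ¬ e ≤ s := not_le.mpr hlt
    have hrec : (e - (s + 1)).toNat = n := by omega
    rw [PySem.List.pyRange_one_cons hlt, List.foldl_cons]
    by_cases hk : (0 ≤ (PySem.List.pyGet? op_signal s).getD 0)
    · have hks : (fun i => decide (0 ≤ (PySem.List.pyGet? op_signal i).getD 0)) s = true := by
        simp [hk]
      cases b with
      | false =>
        have hstep : pvStepA op_signal (false, start, acc) s = (true, s, acc) := by
          simp [pvStepA, hk]
        rw [hstep, ih (s+1) hrec true s acc]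
        simp [pvSpecRun_true (fun i => decide (0 ≤ (PySem.List.pyGet? op_signal i).getD 0)) e none s hne hks]
      | true =>
        have hstep : pvStepA op_signal (true, start, acc) s = (true, start, acc) := by
          simp [pvStepA, not_lt.mpr hk]
        rw [hstep, ih (s+1) hrec true start acc]
        simp [pvSpecRun_true (fun i => decide (0 ≤ (PySem.List.pyGet? op_signal i).getD 0)) e (some start) s hne hks]
    · have hk' : (PySem.List.pyGet? op_signal s).getD 0 < 0 := by omega
      have hks : (fun i => decide (0 ≤ (PySem.List.pyGet? op_signal i).getD 0)) s = false := by
        simp [hk]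
      cases b with
      | false =>
        have hstep : pvStepA op_signal (false, start, acc) s = (false, start, acc) := by
          simp [pvStepA, hk]
        rw [hstep, ih (s+1) hrec false start acc]
        simp [pvSpecRun_false_none (fun i => decide (0 ≤ (PySem.List.pyGet? op_signal i).getD 0)) e s hne hks]
      | true =>
        have hstep : pvStepA op_signal (true, start, acc) s
            = (false, start, acc ++ [[start, s - 1]]) := by
          simp [pvStepA, hk, hk']
        rw [hstep, ih (s+1) hrec false start (acc ++ [[start, s - 1]])]
        simp [pvSpecRun_false_some (fun i => decide (0 ≤ (PySem.List.pyGet? op_signal i).getD 0)) e start s hne hks]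

-- B-side proof vocabulary: the suffix start/end filters and the zip-into-intervals map
def pvStarts (key : Int → Bool) (b e s : Int) : List Int :=
  (PySem.List.pyRange s e 1).filter (fun i => key i && (decide (i = b) || !key (i - 1)))

def pvEnds (key : Int → Bool) (e s : Int) : List Int :=
  (PySem.List.pyRange s e 1).filter (fun i => key i && (decide (i = e - 1) || !key (i + 1)))

def pvZip (S E : List Int) : List (List Int) :=
  (S.zip E).map (fun p => [p.1, p.2])

lemma pvStarts_nil (key : Int → Bool) (b e s : Int) (h : e ≤ s) :
    pvStarts key b e s = [] := by
  simp [pvStarts, PySem.List.pyRange_one_eq_nil h]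

lemma pvEnds_nil (key : Int → Bool) (e s : Int) (h : e ≤ s) :
    pvEnds key e s = [] := by
  simp [pvEnds, PySem.List.pyRange_one_eq_nil h]

lemma pvStarts_cons (key : Int → Bool) (b e s : Int) (h : s < e) :
    pvStarts key b e s
      = (if key s && (decide (s = b) || !key (s - 1)) then [s] else [])
          ++ pvStarts key b e (s + 1) := by
  rw [pvStarts, PySem.List.pyRange_one_cons h, List.filter_cons]
  split <;> simp_all [pvStarts]

lemma pvEnds_cons (key : Int → Bool) (e s : Int) (h : s < e) :
    pvEnds key e s
      = (if key s && (decide (s = e - 1) || !key (s + 1)) then [s] else [])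
          ++ pvEnds key e (s + 1) := by
  rw [pvEnds, PySem.List.pyRange_one_cons h, List.filter_cons]
  split <;> simp_all [pvEnds]

lemma pvZip_cons (a b : Int) (S E : List Int) :
    pvZip (a :: S) (b :: E) = [a, b] :: pvZip S E := by
  simp [pvZip]

-- the joint invariant: C (closed state) and O (open run pending) as one strong induction
lemma pvB_inv (key : Int → Bool) (b e : Int) :
    ∀ (n : Nat) (s : Int), (e - s).toNat = n → b ≤ s →
      ((s = b ∨ key (s - 1) = false) →
        pvSpecRun key e none s = pvZip (pvStarts key b e s) (pvEnds key e s)) ∧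
      (s < e → key s = true → b < s → key (s - 1) = true →
        ∀ st : Int, ∃ c D, pvSpecRun key e (some st) s
            = [st, c] :: pvZip (pvStarts key b e s) D ∧ pvEnds key e s = c :: D) := by
  intro n
  induction n using Nat.strong_induction_on with
  | _ n ih =>
    intro s hn hbs
    constructor
    · -- closed state
      intro hprev
      by_cases hse : e ≤ s
      · rw [pvSpecRun_stop _ _ _ _ hse, pvStarts_nil _ _ _ _ hse, pvEnds_nil _ _ _ hse]
        simp [pvZip]
      · have hlt : s < e := lt_of_not_ge hse
        by_cases hk : key s = true
        · -- s opens (or is) a run: s ∈ starts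
          have hsS : (key s && (decide (s = b) || !key (s - 1))) = true := by
            simp only [hk, Bool.true_and]
            rcases hprev with h | h <;> simp [h]
          rw [pvSpecRun_true _ _ _ _ hse hk]
          simp only [Option.getD_none]
          by_cases hend : e ≤ s + 1
          · -- s is the last index: s ∈ ends, both singletons
            have hs1 : s = e - 1 := by omega
            have hsE : (key s && (decide (s = e - 1) || !key (s + 1))) = true := by
              simp only [hk, Bool.true_and]
              simp [hs1]
            rw [pvSpecRun_stop _ _ _ _ hend,
                pvStarts_cons _ _ _ _ hlt, pvEnds_cons _ _ _ hlt,
                pvStarts_nil _ _ _ _ hend, pvEnds_nil _ _ _ hend, hsS, hsE]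
            simp [pvZip, hs1]
          · have hlt1 : s + 1 < e := lt_of_not_ge hend
            by_cases hk1 : key (s + 1) = true
            · -- run continues: use the open invariant at s+1
              obtain ⟨c, D, hrun, hE⟩ :=
                ((ih (e - (s+1)).toNat (by omega) (s+1) rfl (by omega)).2 hlt1 hk1
                  (by omega) (by simpa using hk) s)
              have hsE : (key s && (decide (s = e - 1) || !key (s + 1))) = false := by
                simp [hk1]; omega
              rw [hrun, pvStarts_cons _ _ _ _ hlt, pvEnds_cons _ _ _ hlt, hsS, hsE, hE]
              simp [pvZip_cons]
            · -- run is the singleton [s, s]: next key false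
              have hk1f : key (s + 1) = false := by simpa using hk1
              have hsE : (key s && (decide (s = e - 1) || !key (s + 1))) = true := by
                simp [hk, hk1f]
              have hkprev : key (s + 1 + 1 - 1) = false := by
                have h11 : s + 1 + 1 - 1 = s + 1 := by ring
                rw [h11]; exact hk1f
              have hC2 := ((ih (e - (s+1+1)).toNat (by omega) (s+1+1) rfl (by omega)).1
                (Or.inr hkprev))
              rw [pvSpecRun_false_some _ _ _ _ (by omega) hk1f, hC2,
                  pvStarts_cons _ _ _ _ hlt, pvEnds_cons _ _ _ hlt, hsS, hsE,
                  pvStarts_cons _ _ _ _ hlt1, pvEnds_cons _ _ _ hlt1]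
              have hsS1 : (key (s+1) && (decide (s+1 = b) || !key (s+1-1))) = false := by
                simp [hk1f]
              have hsE1 : (key (s+1) && (decide (s+1 = e-1) || !key (s+1+1))) = false := by
                simp [hk1f]
              rw [hsS1, hsE1]
              simp [pvZip_cons, show s + 1 - 1 = s by ring]
        · -- key s false: s in neither list
          have hkf : key s = false := by simpa using hk
          have hC1 := ((ih (e - (s+1)).toNat (by omega) (s+1) rfl (by omega)).1
            (Or.inr (by simpa using hkf)))
          rw [pvSpecRun_false_none _ _ _ hse hkf, hC1,
              pvStarts_cons _ _ _ _ hlt, pvEnds_cons _ _ _ hlt]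
          simp [hkf]
    · -- open state
      intro hlt hk hbs' hprev st
      have hse : ¬ e ≤ s := not_le.mpr hlt
      have hsS : (key s && (decide (s = b) || !key (s - 1))) = false := by
        simp [hprev]; omega
      rw [pvSpecRun_true _ _ _ _ hse hk]
      simp only [Option.getD_some]
      by_cases hend : e ≤ s + 1
      · -- s is the last index
        have hs1 : s = e - 1 := by omega
        have hsE : (key s && (decide (s = e - 1) || !key (s + 1))) = true := by
          simp only [hk, Bool.true_and]
          simp [hs1]
        refine ⟨s, [], ?_, ?_⟩
        · rw [pvSpecRun_stop _ _ _ _ hend, pvStarts_cons _ _ _ _ hlt, hsS,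
              pvStarts_nil _ _ _ _ hend]
          simp [pvZip, hs1]
        · rw [pvEnds_cons _ _ _ hlt, hsE, pvEnds_nil _ _ _ hend]
          simp
      · have hlt1 : s + 1 < e := lt_of_not_ge hend
        by_cases hk1 : key (s + 1) = true
        · -- run continues
          obtain ⟨c, D, hrun, hE⟩ :=
            ((ih (e - (s+1)).toNat (by omega) (s+1) rfl (by omega)).2 hlt1 hk1
              (by omega) (by simpa using hk) st)
          have hsE : (key s && (decide (s = e - 1) || !key (s + 1))) = false := by
            simp [hk1]; omega
          refine ⟨c, D, ?_, ?_⟩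
          · rw [hrun, pvStarts_cons _ _ _ _ hlt, hsS]; simp
          · rw [pvEnds_cons _ _ _ hlt, hsE, hE]; simp
        · -- run ends at s
          have hk1f : key (s + 1) = false := by simpa using hk1
          have hsE : (key s && (decide (s = e - 1) || !key (s + 1))) = true := by
            simp [hk, hk1f]
          have hkprev : key (s + 1 + 1 - 1) = false := by
            have h11 : s + 1 + 1 - 1 = s + 1 := by ring
            rw [h11]; exact hk1f
          have hC2 := ((ih (e - (s+1+1)).toNat (by omega) (s+1+1) rfl (by omega)).1
            (Or.inr hkprev))
          refine ⟨s, pvEnds key e (s + 1 + 1), ?_, ?_⟩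
          · rw [pvSpecRun_false_some _ _ _ _ (by omega) hk1f, hC2,
                pvStarts_cons _ _ _ _ hlt, hsS, pvStarts_cons _ _ _ _ hlt1]
            have hsS1 : (key (s+1) && (decide (s+1 = b) || !key (s+1-1))) = false := by
              simp [hk1f]
            rw [hsS1]
            simp [show s + 1 - 1 = s by ring]
          · rw [pvEnds_cons _ _ _ hlt, hsE, pvEnds_cons _ _ _ hlt1]
            have hsE1 : (key (s+1) && (decide (s+1 = e-1) || !key (s+1+1))) = false := by
              simp [hk1f]
            rw [hsE1]
            simp

-- the port's literal '< 0' tests equal the '!key' form used in the invariant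
lemma pvNegDecide (x : Int) : decide (x < 0) = !decide (0 ≤ x) := by
  by_cases h : x < 0
  · simp [h]
  · simp [h]
    omega

-- ===== VERDICT (by name: the statement is the Claim_ definition above) =====
theorem explain_sat_eventually_spec : Claim_equal_explain_sat_eventually := by
  intro op_signal intervals _ _
  unfold Spec_explain_sat_eventually
  cases intervals with
  | nil => rfl
  | cons iv rest =>
    simp only [explain_sat_eventually, explain_sat_eventually_alt]
    rw [pvA_run op_signal (op_signal.length : Int)
        ((op_signal.length : Int) - ((PySem.List.pyGet? iv 0).getD 0)).toNat
        ((PySem.List.pyGet? iv 0).getD 0) rfl false 0 []]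
    have hif : (if (false : Bool) = true then some (0 : Int) else none) = none := rfl
    rw [List.nil_append, hif]
    rw [(pvB_inv (fun i => decide (0 ≤ (PySem.List.pyGet? op_signal i).getD 0))
        ((PySem.List.pyGet? iv 0).getD 0) (op_signal.length : Int)
        ((op_signal.length : Int) - ((PySem.List.pyGet? iv 0).getD 0)).toNat
        ((PySem.List.pyGet? iv 0).getD 0) rfl le_rfl).1 (Or.inl rfl)]
    unfold pvZip pvStarts pvEnds
    congr 1
    congr 1
    · exact List.filter_congr (fun i _ => by simp only [pvNegDecide])
    · exact List.filter_congr (fun i _ => by simp only [pvNegDecide])
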